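-- pv_equiv track=rewrite | github.com/SNMHZ/resolved | BOJ/1759_G5.py | check
-- ===== SOURCE A (Python) =====
-- def check(_str):
--     vow, con = 0, 0
--     for c in _str:
--         if c in ['a', 'e', 'i', 'o', 'u']:
--             vow += 1
--         else:
--             con += 1
--     return True if vow >= 1 and con >= 2 else False
-- ===== SOURCE B (Python) =====
-- def check(_str):
--     # Short-circuiting state machine: track the REMAINING requirements
--     # (1 vowel, 2 consonants), decrement them as characters arrive, and
--     # succeed as soon as both reach zero -- no counts are accumulated and
--     # the string is not necessarily scanned to its end.
--     need_v, need_c = 1, 2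
--     i = 0
--     while not (need_v == 0 and need_c == 0):
--         if i == len(_str):
--             return False
--         if _str[i] in 'aeiou':
--             need_v = max(need_v - 1, 0)
--         else:
--             need_c = max(need_c - 1, 0)
--         i += 1
--     return True
-- ===== Notes on version B (the rewrite author's own statement) =====
-- stated objective: alternative
-- what changed: Replaces A's two-counter accumulation over the whole string by a short-circuiting state machine that decrements remaining requirements (1 vowel, 2 consonants) and returns True as soon as both are satisfied, usually before the end of the string.
import Mathlib
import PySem

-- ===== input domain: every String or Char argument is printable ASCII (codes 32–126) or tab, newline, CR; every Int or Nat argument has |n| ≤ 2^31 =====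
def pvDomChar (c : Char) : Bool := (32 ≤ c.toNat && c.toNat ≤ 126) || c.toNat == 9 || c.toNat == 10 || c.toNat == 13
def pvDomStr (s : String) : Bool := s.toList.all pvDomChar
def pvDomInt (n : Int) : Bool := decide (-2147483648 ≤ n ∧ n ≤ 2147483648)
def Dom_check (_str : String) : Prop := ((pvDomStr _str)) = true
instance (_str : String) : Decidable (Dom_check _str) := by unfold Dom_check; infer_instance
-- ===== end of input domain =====

-- B replaces A's two-counter accumulation by a short-circuiting state machine
-- that decrements the remaining requirements (1 vowel, 2 consonants) and stops early.

-- ===== PORT A =====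
-- literal port: fold over the characters carrying the (vow, con) pair, same branch order
def check (_str : String) : Bool :=
  let p := _str.toList.foldl
    (fun (s : Int × Int) c =>
      if c = 'a' ∨ c = 'e' ∨ c = 'i' ∨ c = 'o' ∨ c = 'u' then (s.1 + 1, s.2)
      else (s.1, s.2 + 1)) (0, 0)
  if p.1 ≥ 1 ∧ p.2 ≥ 2 then true else false

-- ===== PORT B =====
def isVowelB (c : Char) : Bool := c = 'a' || c = 'e' || c = 'i' || c = 'o' || c = 'u'

-- B's while-loop as structural recursion over the remaining characters: remaining needs,
-- early True once both hit 0 (Nat subtraction = Python's max(x-1,0))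
def goB : List Char → Nat → Nat → Bool
  | l, nv, nc =>
    if nv = 0 ∧ nc = 0 then true
    else match l with
      | [] => false
      | c :: t => if isVowelB c then goB t (nv - 1) nc else goB t nv (nc - 1)

def check_alt (_str : String) : Bool := goB _str.toList 1 2

-- ===== PRECONDITION & SPEC =====
def Spec_check (_str : String) (out : Bool) : Prop := out = check_alt _str
instance (_str : String) (out : Bool) : Decidable (Spec_check _str out) := by unfold Spec_check; infer_instance

-- ===== CLAIM (what is proved, stated in full; the proofs are below) =====
def Claim_equal_check : Prop := ∀ (_str : String), Dom_check _str → Spec_check _str (check _str)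

-- ===== LEMMAS AND PROOFS =====

-- A's fold accumulates (vow₀ + #vowels, con₀ + #non-vowels)
theorem check_fold_char (l : List Char) (v c : Int) :
    l.foldl (fun (s : Int × Int) ch =>
      if ch = 'a' ∨ ch = 'e' ∨ ch = 'i' ∨ ch = 'o' ∨ ch = 'u' then (s.1 + 1, s.2)
      else (s.1, s.2 + 1)) (v, c)
    = (v + (l.countP isVowelB : Nat), c + ((l.length : Int) - (l.countP isVowelB : Nat))) := by
  induction l generalizing v c with
  | nil => simp
  | cons hd tl ih =>
    by_cases h : hd = 'a' ∨ hd = 'e' ∨ hd = 'i' ∨ hd = 'o' ∨ hd = 'u'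
    · have hv : isVowelB hd = true := by
        simp [isVowelB]; rcases h with h|h|h|h|h <;> simp [h]
      simp [List.foldl_cons, h, ih, hv]
      omega
    · have hv : isVowelB hd = false := by
        simp only [isVowelB]; push_neg at h
        simp [h.1, h.2.1, h.2.2.1, h.2.2.2.1, h.2.2.2.2]
      simp [List.foldl_cons, h, ih, hv]
      omega

-- B's state machine succeeds iff the string holds enough vowels and non-vowels
theorem goB_eq (l : List Char) (nv nc : Nat) :
    goB l nv nc = (decide (nv ≤ l.countP isVowelB) && decide (nc ≤ l.length - l.countP isVowelB)) := by
  induction l generalizing nv nc with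
  | nil =>
    unfold goB
    by_cases h : nv = 0 ∧ nc = 0 <;> simp_all <;> omega
  | cons hd tl ih =>
    unfold goB
    have hle := List.countP_le_length (l := tl) (p := isVowelB)
    by_cases h : nv = 0 ∧ nc = 0
    · simp [h]
    · by_cases hv : isVowelB hd = true
      · simp only [h, if_false, hv, if_true, ih, List.countP_cons, List.length_cons]
        congr 1 <;> rw [decide_eq_decide] <;> omega
      · simp only [Bool.not_eq_true] at hv
        simp only [h, if_false, hv, Bool.false_eq_true, if_false, ih,
          List.countP_cons, List.length_cons]
        congr 1 <;> rw [decide_eq_decide] <;> omega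

-- ===== VERDICT (by name: the statement is the Claim_ definition above) =====
theorem check_spec : Claim_equal_check := by
  intro s _
  unfold Spec_check check check_alt
  simp only [check_fold_char, goB_eq]
  have hle := List.countP_le_length (l := s.toList) (p := isVowelB)
  by_cases h1 : (1:Nat) ≤ s.toList.countP isVowelB <;>
    by_cases h2 : (2:Nat) ≤ s.toList.length - s.toList.countP isVowelB <;>
      simp [h1, h2] <;> omega
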